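-- pv_equiv track=rewrite | github.com/sdodlapa/BioPipelines | scripts/analyze_container_packages.py | analyze_package_usage
-- ===== SOURCE A (Python) =====
-- from collections import Counter
--
-- def analyze_package_usage(containers):
--     """Count package usage across containers."""
--     package_count = Counter()
--     package_containers = {}
--
--     for container, packages in containers.items():
--         if container == 'base':
--             continue
--         for pkg in packages:
--             package_count[pkg] += 1
--             if pkg not in package_containers:
--                 package_containers[pkg] = []
--             package_containers[pkg].append(container)
--
--     return package_count, package_containers
-- ===== SOURCE B (Python) =====
-- from collections import Counter
--
-- def analyze_package_usage(containers):
--     """Count package usage across containers."""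
--     pairs = [(pkg, container)
--              for container, packages in containers.items()
--              if container != 'base'
--              for pkg in packages]
--     seen = []
--     for pkg, _ in pairs:
--         if pkg not in seen:
--             seen.append(pkg)
--     package_containers = {pkg: [c for p, c in pairs if p == pkg] for pkg in seen}
--     package_count = Counter({pkg: len(cs) for pkg, cs in package_containers.items()})
--     return package_count, package_containers
-- ===== Notes on version B (the rewrite author's own statement) =====
-- stated objective: alternative
-- what changed: B first flattens the dict into a (package, container) pair list, dedups the keys in first-occurrence order, then builds each package's container list by a filter scan over the pair list and the Counter from those lists' lengths, instead of A's incremental dict-and-counter updates inside nested loops; trades the single-pass dict build for a per-distinct-key scan.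
import Mathlib
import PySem

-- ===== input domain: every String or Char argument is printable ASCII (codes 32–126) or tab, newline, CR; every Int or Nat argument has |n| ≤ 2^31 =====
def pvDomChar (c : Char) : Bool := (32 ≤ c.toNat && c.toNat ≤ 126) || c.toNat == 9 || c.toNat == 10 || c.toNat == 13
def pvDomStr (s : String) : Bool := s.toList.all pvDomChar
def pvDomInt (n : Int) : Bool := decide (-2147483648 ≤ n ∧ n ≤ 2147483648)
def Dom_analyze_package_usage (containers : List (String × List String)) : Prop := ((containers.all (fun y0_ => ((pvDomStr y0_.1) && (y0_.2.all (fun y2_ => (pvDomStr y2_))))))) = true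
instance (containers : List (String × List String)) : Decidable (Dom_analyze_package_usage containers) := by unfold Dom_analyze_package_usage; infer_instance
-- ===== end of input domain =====

-- B flattens the dict into a (package, container) pair list, dedups the keys in first-occurrence
-- order, and builds each package's container list by a filter scan over the pairs (and the Counter
-- from the lists' lengths), instead of A's incremental dict-and-counter updates (alternative).

-- ===== PORT A =====
-- one iteration of A's inner 'for pkg in packages' body: bump the Counter, ensure the key, append
def stepA (c : String) (st : PySem.Dict String Int × PySem.Dict String (List String)) (pkg : String) :
    PySem.Dict String Int × PySem.Dict String (List String) :=
  let cnt := st.1.modify pkg 0 (· + 1)                              -- package_count[pkg] += 1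
  let pc := if st.2.contains pkg then st.2 else st.2.insert pkg []  -- if pkg not in …: … = []
  (cnt, pc.modify pkg [] (· ++ [c]))                                -- package_containers[pkg].append(container)

def analyze_package_usage (containers : List (String × List String)) :
    (List (String × Int)) × (List (String × List String)) :=
  let st := containers.foldl
    (fun st cp => if cp.1 == "base" then st else cp.2.foldl (stepA cp.1) st)
    (PySem.Dict.empty, PySem.Dict.empty)
  (st.1.items, st.2.items)

-- ===== PORT B =====
-- the flattened [(pkg, container) for container, packages in … if container != 'base' for pkg in packages]
def pairsOf (containers : List (String × List String)) : List (String × String) :=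
  containers.flatMap (fun cp => if cp.1 == "base" then [] else cp.2.map (fun pkg => (pkg, cp.1)))

def analyze_package_usage_alt (containers : List (String × List String)) :
    (List (String × Int)) × (List (String × List String)) :=
  let pairs := pairsOf containers
  -- seen = first occurrence of each package, in order
  let seen := pairs.foldl (fun s p => if s.contains p.1 then s else s ++ [p.1]) []
  -- {pkg: [c for p, c in pairs if p == pkg] for pkg in seen}
  let pc := seen.map (fun pkg => (pkg, (pairs.filter (fun q => q.1 == pkg)).map (·.2)))
  -- Counter({pkg: len(cs) ...})
  (pc.map (fun p => (p.1, (p.2.length : Int))), pc)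

-- ===== PRECONDITION & SPEC =====
def Spec_analyze_package_usage (containers : List (String × List String)) (out : (List (String × Int)) × (List (String × List String))) : Prop := out = analyze_package_usage_alt containers
instance (containers : List (String × List String)) (out : (List (String × Int)) × (List (String × List String))) : Decidable (Spec_analyze_package_usage containers out) := by unfold Spec_analyze_package_usage; infer_instance

-- ===== CLAIM (what is proved, stated in full; the proofs are below) =====
def Claim_equal_analyze_package_usage : Prop := ∀ (containers : List (String × List String)), Dom_analyze_package_usage containers → Spec_analyze_package_usage containers (analyze_package_usage containers)


-- ===== LEMMAS AND PROOFS =====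
-- proof-only bridge: the index dict A maintains, built by pure modify steps
def stepI (d : PySem.Dict String (List String)) (p : String × String) : PySem.Dict String (List String) :=
  d.modify p.1 [] (· ++ [p.2])

-- the counts dict A carries is the image of the index dict under "value ↦ its length"
def pvMfun (p : String × List String) : String × Int := (p.1, (p.2.length : Int))

def pvMirror (d : PySem.Dict String (List String)) : PySem.Dict String Int :=
  ⟨d.items.map pvMfun⟩

lemma pvPred (pkg : String) :
    ((fun p : String × Int => p.1 == pkg) ∘ pvMfun) = (fun p : String × List String => p.1 == pkg) := by
  funext p; simp [pvMfun]

lemma mirror_contains (d : PySem.Dict String (List String)) (k : String) :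
    (pvMirror d).contains k = d.contains k := by
  simp only [PySem.Dict.contains, pvMirror, List.any_map, pvPred]

lemma mirror_getD (d : PySem.Dict String (List String)) (k : String) :
    (pvMirror d).getD k 0 = ((d.getD k []).length : Int) := by
  simp only [PySem.Dict.getD, PySem.Dict.get?, pvMirror, List.find?_map, pvPred]
  cases h : d.items.find? (fun p => p.1 == k) with
  | none => simp
  | some q => simp [pvMfun]

lemma mirror_insert (d : PySem.Dict String (List String)) (k : String) (v : List String) :
    pvMirror (d.insert k v) = (pvMirror d).insert k (v.length : Int) := by
  apply PySem.Dict.ext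
  show (d.insert k v).items.map pvMfun = ((pvMirror d).insert k (v.length : Int)).items
  rw [PySem.Dict.items_insert, PySem.Dict.items_insert, mirror_contains]
  by_cases h : d.contains k = true
  · simp only [h, if_true]
    show (d.items.map fun p => if p.1 == k then (k, v) else p).map pvMfun
        = (d.items.map pvMfun).map fun p => if p.1 == k then (k, (v.length : Int)) else p
    rw [List.map_map, List.map_map]
    refine List.map_congr_left (fun p _ => ?_)
    by_cases hp : (p.1 == k) = true
    · simp [Function.comp, hp, pvMfun]
    · simp [Function.comp, hp, pvMfun]
  · simp only [h, Bool.false_eq_true, if_false]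
    show (d.items ++ [(k, v)]).map pvMfun = d.items.map pvMfun ++ [(k, (v.length : Int))]
    simp [pvMfun]

lemma stepA_snd (c : String) (d : PySem.Dict String (List String)) (pkg : String) :
    (stepA c (pvMirror d, d) pkg).2 = stepI d (pkg, c) := by
  simp only [stepA, stepI, PySem.Dict.modify]
  by_cases h : d.contains pkg = true
  · simp [h]
  · have hc : d.contains pkg = false := by simpa using h
    have hf : d.items.find? (fun p => p.1 == pkg) = none := by
      rw [List.find?_eq_none]
      intro p hp hk
      have ha : d.items.any (fun q => q.1 == pkg) = true := List.any_eq_true.mpr ⟨p, hp, hk⟩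
      have hcc : d.contains pkg = true := ha
      simp [hc] at hcc
    have hg : d.getD pkg [] = [] := by
      simp [PySem.Dict.getD, PySem.Dict.get?, hf]
    simp [h, hg, PySem.Dict.getD_insert_self, PySem.Dict.insert_insert_self]

lemma step_commute (c : String) (d : PySem.Dict String (List String)) (pkg : String) :
    stepA c (pvMirror d, d) pkg = (pvMirror (stepI d (pkg, c)), stepI d (pkg, c)) := by
  refine Prod.ext ?_ (stepA_snd c d pkg)
  show (pvMirror d).modify pkg 0 (· + 1) = pvMirror (stepI d (pkg, c))
  simp only [PySem.Dict.modify, stepI, mirror_insert, mirror_getD]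
  congr 1
  simp

lemma inner_commute (c : String) (l : List String) (d : PySem.Dict String (List String)) :
    l.foldl (stepA c) (pvMirror d, d)
      = (pvMirror ((l.map (fun pkg => (pkg, c))).foldl stepI d),
         (l.map (fun pkg => (pkg, c))).foldl stepI d) := by
  induction l generalizing d with
  | nil => rfl
  | cons x xs ih =>
    simp only [List.foldl_cons, List.map_cons, step_commute]
    exact ih _

-- A's nested fold is the flat fold of stepI over the pair list
lemma outer_commute (containers : List (String × List String)) (d : PySem.Dict String (List String)) :
    containers.foldl (fun st cp => if cp.1 == "base" then st else cp.2.foldl (stepA cp.1) st)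
      (pvMirror d, d)
      = (pvMirror ((pairsOf containers).foldl stepI d), (pairsOf containers).foldl stepI d) := by
  induction containers generalizing d with
  | nil => rfl
  | cons cp rest ih =>
    simp only [List.foldl_cons, pairsOf, List.flatMap_cons]
    by_cases hb : (cp.1 == "base") = true
    · simp only [hb, if_true, List.nil_append]
      exact ih d
    · simp only [hb, Bool.false_eq_true, if_false, List.foldl_append, inner_commute]
      exact ih _

-- the flat fold's dict in closed form: keys in first-occurrence order, values by filtering the pairs
lemma items_flat (ps : List (String × String)) :
    ((ps.foldl stepI PySem.Dict.empty).items)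
      = (PySem.Set.update (PySem.Set.empty) (ps.map (·.1))).map
          (fun k => (k, (ps.filter (fun q => q.1 == k)).map (·.2))) := by
  have hstep : stepI = fun (d : PySem.Dict String (List String)) (x : String × String) =>
      d.modify x.1 [] (fun v => v ++ [x.2]) := rfl
  rw [hstep]
  have hn : ((ps.foldl (fun d x => d.modify x.1 [] (fun v => v ++ [x.2])) PySem.Dict.empty).keys).Nodup :=
    PySem.Dict.nodup_keys_foldl_modify_key ps (·.1) [] (fun _ x => (fun v => v ++ [x.2]))
      PySem.Dict.empty (by simp)
  rw [PySem.Dict.items_eq_map_keys _ hn []]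
  rw [PySem.Dict.keys_foldl_modify_key]
  refine List.map_congr_left (fun k _ => ?_)
  congr 1
  rw [PySem.Dict.getD_foldl_modify_append]
  simp [PySem.Dict.getD_empty]

-- B's 'seen' loop is Set.update over the keys
lemma seen_eq (ps : List (String × String)) :
    ps.foldl (fun s p => if s.contains p.1 then s else s ++ [p.1]) []
      = PySem.Set.update (PySem.Set.empty) (ps.map (·.1)) := by
  show ps.foldl (fun s b => PySem.Set.add s b.1) [] = _
  rw [PySem.Set.update_map_eq_foldl_add]
  rfl

-- ===== VERDICT (by name: the statement is the Claim_ definition above) =====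
theorem analyze_package_usage_spec : Claim_equal_analyze_package_usage := by
  intro containers _
  unfold Spec_analyze_package_usage analyze_package_usage analyze_package_usage_alt
  have h0 : (PySem.Dict.empty : PySem.Dict String Int) = pvMirror PySem.Dict.empty := rfl
  rw [h0, outer_commute]
  simp only [seen_eq, ← items_flat, pvMirror]
  rfl
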